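-- pv_equiv track=rewrite | github.com/wronai/code2llm | code2llm/exporters/toon/metrics.py | _compute_package_fan
-- ===== SOURCE A (Python) =====
-- from typing import Any, Dict, List, Tuple, Set, Optional
--
-- def _compute_package_fan(matrix: Dict[Tuple[str, str], int]) -> Dict[str, Dict[str, int]]:
--     """Compute fan-in / fan-out per package."""
--     pkg_fan: Dict[str, Dict[str, int]] = {}
--     all_pkgs = set()
--     for (s, d) in matrix:
--         all_pkgs.add(s)
--         all_pkgs.add(d)
--     for pkg in all_pkgs:
--         fi = sum(v for (s, d), v in matrix.items() if d == pkg)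
--         fo = sum(v for (s, d), v in matrix.items() if s == pkg)
--         pkg_fan[pkg] = {"fan_in": fi, "fan_out": fo}
--     return pkg_fan
-- ===== SOURCE B (Python) =====
-- def _compute_package_fan(matrix):
--     """Single pass over the edge matrix, accumulating fan-in / fan-out per package."""
--     fan_in = {}
--     fan_out = {}
--     for (s, d), v in matrix.items():
--         for p in (s, d):
--             fan_in.setdefault(p, 0)
--             fan_out.setdefault(p, 0)
--         fan_out[s] = fan_out.get(s, 0) + v
--         fan_in[d] = fan_in.get(d, 0) + v
--     return {p: {"fan_in": fi, "fan_out": fan_out[p]} for p, fi in fan_in.items()}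
-- ===== Notes on version B (the rewrite author's own statement) =====
-- stated objective: faster
-- what changed: Instead of scanning the whole matrix twice per package (a sum comprehension for fan_in and one for fan_out for every package), B makes one pass over the matrix, accumulating fan_in and fan_out into dictionaries as each edge is seen.
import Mathlib
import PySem

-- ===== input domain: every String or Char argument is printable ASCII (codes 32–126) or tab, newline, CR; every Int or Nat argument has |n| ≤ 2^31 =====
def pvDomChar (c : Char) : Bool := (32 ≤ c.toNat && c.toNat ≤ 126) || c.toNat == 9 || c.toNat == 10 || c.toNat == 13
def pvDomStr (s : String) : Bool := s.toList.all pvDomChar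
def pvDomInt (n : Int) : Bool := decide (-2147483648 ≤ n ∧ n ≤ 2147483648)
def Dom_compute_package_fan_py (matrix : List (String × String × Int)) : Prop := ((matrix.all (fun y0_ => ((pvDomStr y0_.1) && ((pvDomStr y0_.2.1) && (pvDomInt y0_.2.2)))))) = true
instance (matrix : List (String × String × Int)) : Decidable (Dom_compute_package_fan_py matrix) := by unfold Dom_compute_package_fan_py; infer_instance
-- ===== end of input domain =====

-- B replaces A's per-package rescans of the whole matrix (two sum comprehensions per package)
-- with a single pass over the matrix accumulating fan_in / fan_out dictionaries (objective: faster).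
-- Both ports decode the dict parameter with PySem.Dict.ofList (Python's dict construction from pairs).
-- The Python set iteration order in A is consumed only into a dict result (compared ignoring order);
-- the port iterates it in first-insertion order.

-- ===== PORT A =====
def compute_package_fan_py (matrix : List (String × String × Int)) : List (String × List (String × Int)) :=
  let items := (PySem.Dict.ofList (matrix.map (fun e => ((e.1, e.2.1), e.2.2)))).items.map
      (fun p => (p.1.1, p.1.2, p.2))
  -- all_pkgs = set(); for (s, d) in matrix: all_pkgs.add(s); all_pkgs.add(d)
  let allPkgs : PySem.Set String :=
    items.foldl (fun st e => PySem.Set.add (PySem.Set.add st e.1) e.2.1) PySem.Set.empty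
  -- for pkg in all_pkgs: fi = sum(...); fo = sum(...); pkg_fan[pkg] = {"fan_in": fi, "fan_out": fo}
  let pkgFan : PySem.Dict String (List (String × Int)) :=
    allPkgs.foldl (fun d pkg =>
      let fi := items.foldl (fun acc e => if e.2.1 == pkg then acc + e.2.2 else acc) 0
      let fo := items.foldl (fun acc e => if e.1 == pkg then acc + e.2.2 else acc) 0
      d.insert pkg [("fan_in", fi), ("fan_out", fo)]) PySem.Dict.empty
  pkgFan.items

-- ===== PORT B =====
def compute_package_fan_py_alt (matrix : List (String × String × Int)) : List (String × List (String × Int)) :=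
  let items := (PySem.Dict.ofList (matrix.map (fun e => ((e.1, e.2.1), e.2.2)))).items.map
      (fun p => (p.1.1, p.1.2, p.2))
  -- one pass: register both endpoints, then fan_out[s] += v; fan_in[d] += v
  let st := items.foldl
    (fun (st : PySem.Dict String Int × PySem.Dict String Int) e =>
      let fin := (st.1.setdefault e.1 0).setdefault e.2.1 0
      let fout := (st.2.setdefault e.1 0).setdefault e.2.1 0
      (fin.modify e.2.1 0 (· + e.2.2), fout.modify e.1 0 (· + e.2.2)))
    (PySem.Dict.empty, PySem.Dict.empty)
  st.1.items.map (fun p => (p.1, [("fan_in", p.2), ("fan_out", st.2.getD p.1 0)]))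

-- ===== PRECONDITION & SPEC =====
def Spec_compute_package_fan_py (matrix : List (String × String × Int)) (out : List (String × List (String × Int))) : Prop := out = compute_package_fan_py_alt matrix
instance (matrix : List (String × String × Int)) (out : List (String × List (String × Int))) : Decidable (Spec_compute_package_fan_py matrix out) := by unfold Spec_compute_package_fan_py; infer_instance

-- ===== CLAIM (what is proved, stated in full; the proofs are below) =====
def Claim_equal_compute_package_fan_py : Prop := ∀ (matrix : List (String × String × Int)), Dom_compute_package_fan_py matrix → Spec_compute_package_fan_py matrix (compute_package_fan_py matrix)

-- ===== LEMMAS AND PROOFS =====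

-- the list of both endpoints of every edge, in order (the packages A's set collects)
def pvPkgsOf (es : List (String × String × Int)) : List String :=
  es.flatMap (fun e => [e.1, e.2.1])

-- fan-in / fan-out totals of a package over an edge list
def pvFiSum (es : List (String × String × Int)) (p : String) : Int :=
  ((es.filter (fun e => e.2.1 == p)).map (fun e => e.2.2)).sum
def pvFoSum (es : List (String × String × Int)) (p : String) : Int :=
  ((es.filter (fun e => e.1 == p)).map (fun e => e.2.2)).sum

-- B's two per-edge accumulator steps (the components of the paired fold in the port)
def pvFinStep (d : PySem.Dict String Int) (e : String × String × Int) : PySem.Dict String Int :=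
  ((d.setdefault e.1 0).setdefault e.2.1 0).modify e.2.1 0 (· + e.2.2)
def pvFoutStep (d : PySem.Dict String Int) (e : String × String × Int) : PySem.Dict String Int :=
  ((d.setdefault e.1 0).setdefault e.2.1 0).modify e.1 0 (· + e.2.2)

-- A's set-building loop is Set.update with the flattened endpoint list
theorem pv_setfold (es : List (String × String × Int)) (s : PySem.Set String) :
    es.foldl (fun st e => PySem.Set.add (PySem.Set.add st e.1) e.2.1) s
      = PySem.Set.update s (pvPkgsOf es) := by
  induction es generalizing s with
  | nil => simp [pvPkgsOf, PySem.Set.update]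
  | cons e rest ih =>
      simp only [List.foldl_cons, ih, pvPkgsOf, List.flatMap_cons]
      simp [PySem.Set.update]

theorem pv_setdefault_keys (d : PySem.Dict String Int) (k : String) :
    (d.setdefault k 0).keys = PySem.Set.add d.keys k := by
  rw [PySem.Dict.keys_setdefault, PySem.Set.add_eq_ite, PySem.Dict.contains_eq_decide_mem_keys]
  by_cases h : k ∈ d.keys <;> simp [h]

theorem pv_modify_keys_of_mem (d : PySem.Dict String Int) (k : String) (f : Int → Int)
    (h : k ∈ d.keys) : (d.modify k 0 f).keys = d.keys := by
  rw [PySem.Dict.keys_modify, PySem.Dict.keys_insert_of_contains]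
  rw [PySem.Dict.contains_eq_decide_mem_keys]; simpa using h

theorem pv_finStep_keys (d : PySem.Dict String Int) (e : String × String × Int) :
    (pvFinStep d e).keys = PySem.Set.add (PySem.Set.add d.keys e.1) e.2.1 := by
  unfold pvFinStep
  rw [pv_modify_keys_of_mem, pv_setdefault_keys, pv_setdefault_keys]
  rw [pv_setdefault_keys]
  exact (PySem.Set.mem_add _ _ _).2 (Or.inr rfl)

theorem pv_finFold_keys (es : List (String × String × Int)) (d : PySem.Dict String Int) :
    (es.foldl pvFinStep d).keys = PySem.Set.update d.keys (pvPkgsOf es) := by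
  induction es generalizing d with
  | nil => simp [pvPkgsOf, PySem.Set.update]
  | cons e rest ih =>
      simp only [List.foldl_cons, ih, pv_finStep_keys, pvPkgsOf, List.flatMap_cons]
      simp [PySem.Set.update]

-- setdefault with default 0 never changes a getD-with-0 lookup
theorem pv_setdefault_getD (d : PySem.Dict String Int) (k p : String) :
    (d.setdefault k 0).getD p 0 = d.getD p 0 := by
  by_cases h : p = k
  · subst h; rw [PySem.Dict.getD_setdefault_self]
  · rw [PySem.Dict.getD_eq_get?_getD, PySem.Dict.get?_setdefault_of_ne _ _ h,
       ← PySem.Dict.getD_eq_get?_getD]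

theorem pv_fiSum_cons (e : String × String × Int) (rest : List (String × String × Int)) (p : String) :
    pvFiSum (e :: rest) p = (if p = e.2.1 then e.2.2 else 0) + pvFiSum rest p := by
  unfold pvFiSum
  rw [List.filter_cons]
  by_cases h : e.2.1 = p
  · simp [h]
  · have h' : ¬(p = e.2.1) := fun hh => h hh.symm
    simp [h, h']

theorem pv_foSum_cons (e : String × String × Int) (rest : List (String × String × Int)) (p : String) :
    pvFoSum (e :: rest) p = (if p = e.1 then e.2.2 else 0) + pvFoSum rest p := by
  unfold pvFoSum
  rw [List.filter_cons]
  by_cases h : e.1 = p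
  · simp [h]
  · have h' : ¬(p = e.1) := fun hh => h hh.symm
    simp [h, h']

theorem pv_finFold_getD (es : List (String × String × Int)) (d : PySem.Dict String Int) (p : String) :
    (es.foldl pvFinStep d).getD p 0 = d.getD p 0 + pvFiSum es p := by
  induction es generalizing d with
  | nil => simp [pvFiSum]
  | cons e rest ih =>
      rw [List.foldl_cons, ih, pv_fiSum_cons]
      have hstep : (pvFinStep d e).getD p 0 = d.getD p 0 + (if p = e.2.1 then e.2.2 else 0) := by
        unfold pvFinStep
        rw [PySem.Dict.getD_modify, pv_setdefault_getD, pv_setdefault_getD]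
        by_cases h : p = e.2.1 <;> simp [h, pv_setdefault_getD]
      rw [hstep]; ring

theorem pv_foutFold_getD (es : List (String × String × Int)) (d : PySem.Dict String Int) (p : String) :
    (es.foldl pvFoutStep d).getD p 0 = d.getD p 0 + pvFoSum es p := by
  induction es generalizing d with
  | nil => simp [pvFoSum]
  | cons e rest ih =>
      rw [List.foldl_cons, ih, pv_foSum_cons]
      have hstep : (pvFoutStep d e).getD p 0 = d.getD p 0 + (if p = e.1 then e.2.2 else 0) := by
        unfold pvFoutStep
        rw [PySem.Dict.getD_modify, pv_setdefault_getD, pv_setdefault_getD]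
        by_cases h : p = e.1 <;> simp [h, pv_setdefault_getD]
      rw [hstep]; ring

-- A's two per-package rescans compute exactly the totals
theorem pv_fiA (es : List (String × String × Int)) (pkg : String) :
    es.foldl (fun acc e => if e.2.1 == pkg then acc + e.2.2 else acc) 0 = pvFiSum es pkg := by
  unfold pvFiSum
  exact (PySem.List.foldl_if_eq_foldl_filter (fun e => e.2.1 == pkg)
      (fun acc e => acc + e.2.2) es 0).trans
    ((PySem.List.foldl_add (es.filter (fun e => e.2.1 == pkg)) (fun e => e.2.2) 0).trans
      (zero_add _))

theorem pv_foA (es : List (String × String × Int)) (pkg : String) :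
    es.foldl (fun acc e => if e.1 == pkg then acc + e.2.2 else acc) 0 = pvFoSum es pkg := by
  unfold pvFoSum
  exact (PySem.List.foldl_if_eq_foldl_filter (fun e => e.1 == pkg)
      (fun acc e => acc + e.2.2) es 0).trans
    ((PySem.List.foldl_add (es.filter (fun e => e.1 == pkg)) (fun e => e.2.2) 0).trans
      (zero_add _))

-- the core equivalence, on an arbitrary (already dict-normalised) edge list
theorem pv_main (es : List (String × String × Int)) :
    ((es.foldl (fun st e => PySem.Set.add (PySem.Set.add st e.1) e.2.1)
        (PySem.Set.empty : PySem.Set String)).foldl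
      (fun d pkg => d.insert pkg
        [("fan_in", es.foldl (fun acc e => if e.2.1 == pkg then acc + e.2.2 else acc) 0),
         ("fan_out", es.foldl (fun acc e => if e.1 == pkg then acc + e.2.2 else acc) 0)])
      PySem.Dict.empty).items
    = ((es.foldl (fun st e => (pvFinStep st.1 e, pvFoutStep st.2 e))
          ((PySem.Dict.empty : PySem.Dict String Int), (PySem.Dict.empty : PySem.Dict String Int))).1.items.map
        (fun p => (p.1, [("fan_in", p.2),
          ("fan_out", (es.foldl (fun st e => (pvFinStep st.1 e, pvFoutStep st.2 e))
              ((PySem.Dict.empty : PySem.Dict String Int), (PySem.Dict.empty : PySem.Dict String Int))).2.getD p.1 0)]))) := by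
  rw [PySem.List.foldl_prod_mk pvFinStep pvFoutStep, pv_setfold]
  have hnodup : (PySem.Set.update (PySem.Set.empty : PySem.Set String) (pvPkgsOf es)).Nodup :=
    PySem.Set.nodup_update _ _ List.nodup_nil
  rw [PySem.Dict.items_foldl_insert_fresh
        (PySem.Set.update PySem.Set.empty (pvPkgsOf es)) (fun pkg => pkg)
        (fun pkg => [("fan_in", es.foldl (fun acc e => if e.2.1 == pkg then acc + e.2.2 else acc) 0),
                     ("fan_out", es.foldl (fun acc e => if e.1 == pkg then acc + e.2.2 else acc) 0)])
        PySem.Dict.empty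
        (fun a _ => PySem.Dict.contains_empty a)
        (by simpa using hnodup)]
  rw [PySem.Dict.items_eq_map_keys (es.foldl pvFinStep PySem.Dict.empty)
        (by rw [pv_finFold_keys]; simpa using hnodup) 0]
  rw [pv_finFold_keys]
  simp only [PySem.Dict.empty, List.nil_append, List.map_map]
  refine List.map_congr_left (fun pkg _ => ?_)
  simp only [Function.comp_apply]
  rw [pv_fiA, pv_foA, pv_finFold_getD, pv_foutFold_getD]
  simp only [show ({ items := [] } : PySem.Dict String Int).getD pkg 0 = 0 from rfl]
  simp

-- ===== VERDICT (by name: the statement is the Claim_ definition above) =====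
theorem compute_package_fan_py_spec : Claim_equal_compute_package_fan_py := by
  intro matrix _
  unfold Spec_compute_package_fan_py compute_package_fan_py compute_package_fan_py_alt
  exact pv_main ((PySem.Dict.ofList (matrix.map (fun e => ((e.1, e.2.1), e.2.2)))).items.map
      (fun p => (p.1.1, p.1.2, p.2)))
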